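-- pv_equiv track=rewrite | github.com/lunadong/paper-agent | area_summary/generate_html.py | merge_glossaries
-- ===== SOURCE A (Python) =====
-- def merge_glossaries(topic_summaries, cross_topic):
--     """Merge and deduplicate glossary terms from all sources, sorted alphabetically."""
--     seen = {}
--     for ts in topic_summaries.values():
--         for item in ts.get("glossary", []):
--             term = item.get("term", "")
--             if term and term.lower() not in seen:
--                 seen[term.lower()] = item
--     for item in cross_topic.get("glossary", []):
--         term = item.get("term", "")
--         if term and term.lower() not in seen:
--             seen[term.lower()] = item
--     return sorted(seen.values(), key=lambda x: x.get("term", "").lower())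
-- ===== SOURCE B (Python) =====
-- def merge_glossaries(topic_summaries, cross_topic):
--     """Gather all items, stable-sort by lowercase term, drop falsy terms,
--     then keep the first item of each run of equal lowercase keys."""
--     items = [it for ts in topic_summaries.values() for it in ts.get("glossary", [])]
--     items += cross_topic.get("glossary", [])
--     items.sort(key=lambda x: x.get("term", "").lower())
--     items = [it for it in items if it.get("term", "")]
--     out = []
--     i = 0
--     n = len(items)
--     while i < n:
--         x = items[i]
--         out.append(x)
--         k = x.get("term", "").lower()
--         i += 1
--         while i < n and items[i].get("term", "").lower() == k:
--             i += 1
--     return out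
-- ===== Notes on version B (the rewrite author's own statement) =====
-- stated objective: alternative
-- what changed: A dedups first into an insertion-ordered dict keyed by lowercase term and then sorts the dict values; B gathers every item into one list, stable-sorts it by lowercase term, filters out falsy terms, and then takes the first item of each run of equal lowercase keys in a grouping pass - no dict and no seen-set at all.
import Mathlib
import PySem

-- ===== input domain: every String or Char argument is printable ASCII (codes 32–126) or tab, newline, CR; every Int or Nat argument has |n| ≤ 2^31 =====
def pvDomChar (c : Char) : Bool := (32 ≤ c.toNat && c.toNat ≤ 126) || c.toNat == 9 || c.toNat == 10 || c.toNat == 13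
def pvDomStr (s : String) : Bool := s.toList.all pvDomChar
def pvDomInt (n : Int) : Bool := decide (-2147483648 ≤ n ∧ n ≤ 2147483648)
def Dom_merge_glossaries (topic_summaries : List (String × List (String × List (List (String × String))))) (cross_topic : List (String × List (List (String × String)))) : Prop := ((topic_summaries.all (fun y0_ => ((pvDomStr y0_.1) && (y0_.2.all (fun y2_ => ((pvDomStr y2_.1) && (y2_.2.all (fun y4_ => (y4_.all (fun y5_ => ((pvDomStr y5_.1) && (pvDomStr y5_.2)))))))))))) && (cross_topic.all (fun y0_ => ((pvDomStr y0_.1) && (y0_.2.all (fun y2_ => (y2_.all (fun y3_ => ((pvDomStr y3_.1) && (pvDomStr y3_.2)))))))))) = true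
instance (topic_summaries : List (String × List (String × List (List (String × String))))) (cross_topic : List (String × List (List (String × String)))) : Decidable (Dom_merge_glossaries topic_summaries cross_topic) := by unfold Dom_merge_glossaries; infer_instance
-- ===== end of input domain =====

-- B merges the glossaries by gather → stable sort by lowercase term → filter falsy terms →
-- keep the first item of each equal-key run, instead of A's dedup-into-a-dict → sort of the
-- dict values; same result, proved equivalent.

-- shared helpers: item.get("term", "") and its lowercase sort/dedup key
def pvTerm (item : List (String × String)) : String :=
  PySem.Dict.getD (PySem.Dict.mk item) "term" ""

def pvKey (item : List (String × String)) : String :=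
  PySem.Str.lower (pvTerm item)

-- ===== PORT A =====
-- body of A's two identical loops: insert item under its lowercase key if term is truthy and key unseen
def pvAStep (seen : PySem.Dict String (List (String × String))) (item : List (String × String)) :
    PySem.Dict String (List (String × String)) :=
  let term := pvTerm item
  if !(term == "") && !(seen.contains (PySem.Str.lower term)) then
    seen.insert (PySem.Str.lower term) item
  else seen

def merge_glossaries (topic_summaries : List (String × List (String × List (List (String × String))))) (cross_topic : List (String × List (List (String × String)))) : List (List (String × String)) :=
  let seen : PySem.Dict String (List (String × String)) :=
    topic_summaries.foldl
      (fun seen ts => (PySem.Dict.getD (PySem.Dict.mk ts.2) "glossary" []).foldl pvAStep seen)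
      PySem.Dict.empty
  let seen := (PySem.Dict.getD (PySem.Dict.mk cross_topic) "glossary" []).foldl pvAStep seen
  PySem.List.sorted seen.values pvKey

-- ===== PORT B =====
-- B's grouping loop: emit the current item, then the inner while skips the rest of its run
-- (the skipping inner while is the first arm of pvRunsAfter; the outer while's next emit is its second arm)
def pvRunsAfter (k : String) : List (List (String × String)) → List (List (String × String))
  | [] => []
  | y :: t => if pvKey y == k then pvRunsAfter k t else y :: pvRunsAfter (pvKey y) t

def pvRuns : List (List (String × String)) → List (List (String × String))
  | [] => []
  | x :: t => x :: pvRunsAfter (pvKey x) t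

def merge_glossaries_alt (topic_summaries : List (String × List (String × List (List (String × String))))) (cross_topic : List (String × List (List (String × String)))) : List (List (String × String)) :=
  let items :=
    topic_summaries.flatMap (fun ts => PySem.Dict.getD (PySem.Dict.mk ts.2) "glossary" [])
      ++ PySem.Dict.getD (PySem.Dict.mk cross_topic) "glossary" []
  pvRuns ((PySem.List.sorted items pvKey).filter (fun it => !(pvTerm it == "")))

-- ===== PRECONDITION & SPEC =====
def Spec_merge_glossaries (topic_summaries : List (String × List (String × List (List (String × String))))) (cross_topic : List (String × List (List (String × String)))) (out : List (List (String × String))) : Prop := out = merge_glossaries_alt topic_summaries cross_topic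
instance (topic_summaries : List (String × List (String × List (List (String × String))))) (cross_topic : List (String × List (List (String × String)))) (out : List (List (String × String))) : Decidable (Spec_merge_glossaries topic_summaries cross_topic out) := by unfold Spec_merge_glossaries; infer_instance

-- ===== CLAIM (what is proved, stated in full; the proofs are below) =====
def Claim_equal_merge_glossaries : Prop := ∀ (topic_summaries : List (String × List (String × List (List (String × String))))) (cross_topic : List (String × List (List (String × String)))), Dom_merge_glossaries topic_summaries cross_topic → Spec_merge_glossaries topic_summaries cross_topic (merge_glossaries topic_summaries cross_topic)

-- ===== LEMMAS AND PROOFS =====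

-- proof-only reference function: the first-seen-wins pass over a list, given already-seen keys s
def pvOk (x : List (String × String)) : Bool := !(pvTerm x == "")

def pvScan (s : List String) : List (List (String × String)) → List (List (String × String))
  | [] => []
  | x :: t => if pvOk x = true ∧ pvKey x ∉ s then x :: pvScan (s ++ [pvKey x]) t else pvScan s t

theorem pvScan_sublist (l : List (List (String × String))) (s : List String) :
    (pvScan s l).Sublist l := by
  induction l generalizing s with
  | nil => simp [pvScan]
  | cons x t ih =>
    simp only [pvScan]
    split
    · exact (ih _).cons₂ x
    · exact (ih _).cons x

theorem pvScan_keys (l : List (List (String × String))) (s : List String) :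
    (∀ x ∈ pvScan s l, pvKey x ∉ s) ∧
      (pvScan s l).Pairwise (fun a b => pvKey a ≠ pvKey b) := by
  induction l generalizing s with
  | nil => simp [pvScan]
  | cons x t ih =>
    simp only [pvScan]
    split
    · rename_i h
      refine ⟨?_, ?_⟩
      · intro y hy
        rcases List.mem_cons.mp hy with rfl | hy
        · exact h.2
        · have := (ih (s ++ [pvKey x])).1 y hy
          intro hs; exact this (List.mem_append_left _ hs)
      · refine List.pairwise_cons.mpr ⟨?_, (ih (s ++ [pvKey x])).2⟩
        intro y hy
        have := (ih (s ++ [pvKey x])).1 y hy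
        intro he
        exact this (by simp [he])
    · exact ih s

theorem pvScan_mem (l : List (List (String × String))) (s : List String)
    (x : List (String × String)) :
    x ∈ pvScan s l ↔
      pvKey x ∉ s ∧ l.find? (fun y => pvOk y && (pvKey y == pvKey x)) = some x := by
  induction l generalizing s with
  | nil => simp [pvScan]
  | cons z t ih =>
    simp only [pvScan]
    split
    · rename_i h
      by_cases hk : pvKey z = pvKey x
      · have hfc : (z :: t).find? (fun y => pvOk y && (pvKey y == pvKey x)) = some z :=
          List.find?_cons_of_pos (by simp [h.1, hk])
        rw [hfc]
        constructor
        · intro hm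
          rcases List.mem_cons.mp hm with rfl | hm
          · exact ⟨h.2, rfl⟩
          · have := (ih (s ++ [pvKey z])).mp hm
            exact absurd (by simp [hk] : pvKey x ∈ s ++ [pvKey z]) this.1
        · rintro ⟨-, hx⟩
          exact List.mem_cons.mpr (Or.inl (Option.some.inj hx).symm)
      · have hfc : (z :: t).find? (fun y => pvOk y && (pvKey y == pvKey x))
            = t.find? (fun y => pvOk y && (pvKey y == pvKey x)) :=
          List.find?_cons_of_neg (by simp [hk])
        rw [hfc]
        constructor
        · intro hm
          rcases List.mem_cons.mp hm with rfl | hm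
          · exact absurd rfl hk
          · have := (ih (s ++ [pvKey z])).mp hm
            exact ⟨fun hs => this.1 (List.mem_append_left _ hs), this.2⟩
        · rintro ⟨hs, hx⟩
          refine List.mem_cons.mpr (Or.inr ((ih (s ++ [pvKey z])).mpr ⟨?_, hx⟩))
          intro hmem
          rcases List.mem_append.mp hmem with hmem | hmem
          · exact hs hmem
          · exact hk (List.mem_singleton.mp hmem).symm
    · rename_i h
      rw [ih s]
      by_cases hk : pvKey z = pvKey x
      · have : pvOk z = false ∨ pvKey z ∈ s := by
          by_cases ho : pvOk z = true
          · right
            by_contra hs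
            exact h ⟨ho, hs⟩
          · left; simpa using ho
        rcases this with ho | hs
        · have hfc : (z :: t).find? (fun y => pvOk y && (pvKey y == pvKey x))
              = t.find? (fun y => pvOk y && (pvKey y == pvKey x)) :=
            List.find?_cons_of_neg (by simp [ho])
          rw [hfc]
        · constructor
          · rintro ⟨hxs, hx⟩
            exact absurd (hk ▸ hs) hxs
          · rintro ⟨hxs, hx⟩
            refine ⟨hxs, ?_⟩
            rcases List.find?_cons_eq_some.mp hx with ⟨_, rfl⟩ | ⟨_, hfind⟩
            · exact absurd (hk ▸ hs) hxs
            · exact hfind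
      · have hfc : (z :: t).find? (fun y => pvOk y && (pvKey y == pvKey x))
            = t.find? (fun y => pvOk y && (pvKey y == pvKey x)) :=
          List.find?_cons_of_neg (by simp [hk])
        rw [hfc]

-- A's dict-building loop produces exactly the first-seen-wins list as its values
theorem pvAStep_foldl (l : List (List (String × String)))
    (d : PySem.Dict String (List (String × String))) :
    (l.foldl pvAStep d).values = d.values ++ pvScan d.keys l := by
  induction l generalizing d with
  | nil => simp [pvScan]
  | cons x t ih =>
    simp only [List.foldl_cons, pvScan]
    by_cases h : pvOk x = true ∧ pvKey x ∉ d.keys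
    · have hc : d.contains (PySem.Str.lower (pvTerm x)) = false := by
        rw [PySem.Dict.contains_eq_decide_mem_keys]
        simpa [pvKey] using h.2
      have ho : (pvTerm x == "") = false := by simpa [pvOk] using h.1
      have hstep : pvAStep d x = d.insert (PySem.Str.lower (pvTerm x)) x := by
        simp [pvAStep, ho, hc]
      rw [if_pos h, hstep, ih]
      rw [show (d.insert (PySem.Str.lower (pvTerm x)) x).keys = d.keys ++ [pvKey x] from
            PySem.Dict.keys_insert_of_not_contains d x hc]
      have hv : (d.insert (PySem.Str.lower (pvTerm x)) x).values = d.values ++ [x] := by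
        simp [PySem.Dict.values, PySem.Dict.items_insert_of_not_contains d x hc]
      rw [hv]
      simp
    · rw [if_neg h]
      have hstep : pvAStep d x = d := by
        rcases not_and_or.mp h with ho | hs
        · have ho' : (pvTerm x == "") = true := by simpa [pvOk] using ho
          simp [pvAStep, ho']
        · have hc : d.contains (PySem.Str.lower (pvTerm x)) = true := by
            rw [PySem.Dict.contains_eq_decide_mem_keys]
            simpa [pvKey] using not_not.mp hs
          simp [pvAStep, hc]
      rw [hstep, ih]

-- nested loop over dict values = loop over the concatenation
theorem pvFoldl_flatMap {α β γ : Type} (l : List α) (g : α → List β)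
    (step : γ → β → γ) (init : γ) :
    l.foldl (fun d p => (g p).foldl step d) init = (l.flatMap g).foldl step init := by
  induction l generalizing init with
  | nil => simp
  | cons x t ih => simp [List.foldl_append, ih]

-- insertBy unfolding equations
theorem pvInsertBy_nil {α : Type} (before : α → α → Bool) (x : α) :
    PySem.List.insertBy before x [] = [x] := rfl

theorem pvInsertBy_cons {α : Type} (before : α → α → Bool) (x y : α) (t : List α) :
    PySem.List.insertBy before x (y :: t) =
      if before x y then x :: y :: t else y :: PySem.List.insertBy before x t := rfl

-- insertion keeps the accumulator key-sorted
theorem pvInsertBy_pairwise (x : List (String × String)) (ys : List (List (String × String)))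
    (h : ys.Pairwise (fun a b => pvKey a ≤ pvKey b)) :
    (PySem.List.insertBy (fun a b => decide (pvKey a < pvKey b)) x ys).Pairwise
      (fun a b => pvKey a ≤ pvKey b) := by
  induction ys with
  | nil => simp [pvInsertBy_nil]
  | cons y t ih =>
    rw [pvInsertBy_cons]
    rcases List.pairwise_cons.mp h with ⟨hy, ht⟩
    split
    · rename_i hlt
      refine List.pairwise_cons.mpr ⟨?_, h⟩
      intro z hz
      rcases List.mem_cons.mp hz with rfl | hz
      · exact le_of_lt (by simpa using hlt)
      · exact le_trans (le_of_lt (by simpa using hlt)) (hy z hz)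
    · rename_i hnlt
      refine List.pairwise_cons.mpr ⟨?_, ih ht⟩
      intro z hz
      rcases (PySem.List.mem_insertBy _ _ _ _).mp hz with rfl | hz
      · simpa using hnlt
      · exact hy z hz

-- STABILITY: a filter whose predicate pins the key down commutes with one insertion …
theorem pvFilter_insertBy (p : List (String × String) → Bool) (k : String)
    (hp : ∀ y, p y = true → pvKey y = k)
    (x : List (String × String)) (ys : List (List (String × String)))
    (h : ys.Pairwise (fun a b => pvKey a ≤ pvKey b)) :
    (PySem.List.insertBy (fun a b => decide (pvKey a < pvKey b)) x ys).filter p =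
      ys.filter p ++ if p x then [x] else [] := by
  induction ys with
  | nil => simp [pvInsertBy_nil, List.filter_cons]
  | cons y t ih =>
    rw [pvInsertBy_cons]
    rcases List.pairwise_cons.mp h with ⟨hy, ht⟩
    split
    · rename_i hlt
      have hlt' : pvKey x < pvKey y := by simpa using hlt
      by_cases hpx : p x = true
      · have hempty : (y :: t).filter p = [] := by
          rw [List.filter_eq_nil_iff]
          intro z hz hpz
          have hkz : pvKey z = k := hp z hpz
          have hkx : pvKey x = k := hp x hpx
          have hyz : pvKey y ≤ pvKey z := by
            rcases List.mem_cons.mp hz with rfl | hz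
            · exact le_refl _
            · exact hy z hz
          rw [hkz, ← hkx] at hyz
          exact absurd (lt_of_lt_of_le hlt' hyz) (lt_irrefl _)
        rw [List.filter_cons, if_pos hpx, hempty]
        simp [hpx]
      · rw [List.filter_cons, if_neg hpx]
        simp [hpx]
    · rw [List.filter_cons, List.filter_cons, ih ht]
      by_cases hpy : p y = true
      · rw [if_pos hpy, if_pos hpy, List.cons_append]
      · rw [if_neg hpy, if_neg hpy]

-- … and hence with the whole sort
theorem pvFilter_sorted (p : List (String × String) → Bool) (k : String)
    (hp : ∀ y, p y = true → pvKey y = k) (l : List (List (String × String))) :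
    (PySem.List.sorted l pvKey).filter p = l.filter p := by
  rw [PySem.List.sorted_eq_foldl_insertBy]
  suffices h : ∀ acc : List (List (String × String)),
      acc.Pairwise (fun a b => pvKey a ≤ pvKey b) →
      (l.foldl (fun acc x => PySem.List.insertBy (fun a b => decide (pvKey a < pvKey b)) x acc) acc).filter p
        = acc.filter p ++ l.filter p by
    simpa using h [] (by simp)
  induction l with
  | nil => intro acc _; simp
  | cons x t ih =>
    intro acc hacc
    simp only [List.foldl_cons]
    rw [ih _ (pvInsertBy_pairwise x acc hacc), pvFilter_insertBy p k hp x acc hacc]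
    by_cases hpx : p x = true <;> simp [hpx]

theorem pvFind?_eq_head?_filter {α : Type} (p : α → Bool) (l : List α) :
    l.find? p = (l.filter p).head? := by
  induction l with
  | nil => simp
  | cons x t ih =>
    by_cases h : p x = true
    · rw [List.find?_cons_of_pos h, List.filter_cons, if_pos h]
      rfl
    · rw [List.find?_cons_of_neg h, List.filter_cons, if_neg h, ih]

-- CORE 1: sorting then deduplicating equals deduplicating then sorting
theorem pvScan_sorted (l : List (List (String × String))) :
    PySem.List.sorted (pvScan [] l) pvKey = pvScan [] (PySem.List.sorted l pvKey) := by
  apply PySem.List.sorted_eq_of_perm_of_pairwise_lt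
  · -- permutation, via nodup + same membership
    have hn1 : (pvScan [] (PySem.List.sorted l pvKey)).Nodup :=
      ((pvScan_keys _ _).2.imp (fun h => fun he => h (he ▸ rfl)))
    have hn2 : (pvScan [] l).Nodup :=
      ((pvScan_keys _ _).2.imp (fun h => fun he => h (he ▸ rfl)))
    refine (List.perm_ext_iff_of_nodup hn1 hn2).mpr ?_
    intro x
    rw [pvScan_mem, pvScan_mem]
    have hfind : (PySem.List.sorted l pvKey).find? (fun y => pvOk y && (pvKey y == pvKey x))
        = l.find? (fun y => pvOk y && (pvKey y == pvKey x)) := by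
      rw [pvFind?_eq_head?_filter, pvFind?_eq_head?_filter,
        pvFilter_sorted _ (pvKey x) (fun y hy => by
          have := (Bool.and_eq_true _ _).mp hy
          exact eq_of_beq this.2)]
    rw [hfind]
  · -- strictly increasing keys
    have hle : (pvScan [] (PySem.List.sorted l pvKey)).Pairwise
        (fun a b => pvKey a ≤ pvKey b) :=
      (PySem.List.sorted_pairwise l pvKey).sublist (pvScan_sublist _ _)
    have hne := (pvScan_keys (PySem.List.sorted l pvKey) []).2
    exact (hle.and hne).imp (fun h => lt_of_le_of_ne h.1 h.2)

-- scanning ignores the not-ok elements, so it may as well scan the filtered list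
theorem pvScan_filter (l : List (List (String × String))) (s : List String) :
    pvScan s (l.filter pvOk) = pvScan s l := by
  induction l generalizing s with
  | nil => simp [pvScan]
  | cons x t ih =>
    by_cases ho : pvOk x = true
    · rw [List.filter_cons, if_pos ho]
      simp only [pvScan]
      split
      · rw [ih]
      · rw [ih]
    · rw [List.filter_cons, if_neg ho]
      simp only [pvScan]
      rw [if_neg (fun h => ho h.1), ih]

-- the run-skipping helper is pvRuns after dropping the leading run
theorem pvRunsAfter_dropWhile (k : String) (t : List (List (String × String))) :
    pvRunsAfter k t = pvRuns (t.dropWhile (fun y => pvKey y == k)) := by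
  induction t generalizing k with
  | nil => rfl
  | cons y r ih =>
    by_cases hy : pvKey y = k
    · rw [List.dropWhile_cons_of_pos (by simp [hy])]
      simp only [pvRunsAfter, if_pos (beq_iff_eq.mpr hy)]
      exact ih k
    · rw [List.dropWhile_cons_of_neg (by simp [hy])]
      simp only [pvRunsAfter, pvRuns]
      rw [if_neg (by simpa using hy)]

-- a key already seen: the scan skips its whole leading run
theorem pvScan_skip (k : String) (s : List String) (t : List (List (String × String)))
    (hk : k ∈ s) :
    pvScan s (t.dropWhile (fun y => pvKey y == k)) = pvScan s t := by
  induction t with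
  | nil => rfl
  | cons y r ih =>
    by_cases hy : pvKey y = k
    · rw [List.dropWhile_cons_of_pos (by simp [hy]), ih]
      simp only [pvScan]
      rw [if_neg (fun h => h.2 (hy ▸ hk))]
    · rw [List.dropWhile_cons_of_neg (by simp [hy])]

-- in a key-sorted list every element surviving dropWhile of a minimal key k has key ≠ k
theorem pvDropWhile_keys (k : String) (t : List (List (String × String)))
    (hs : t.Pairwise (fun a b => pvKey a ≤ pvKey b))
    (hge : ∀ y ∈ t, k ≤ pvKey y) :
    ∀ y ∈ t.dropWhile (fun y => pvKey y == k), pvKey y ≠ k := by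
  induction t with
  | nil => simp
  | cons z r ih =>
    rcases List.pairwise_cons.mp hs with ⟨hz, hr⟩
    by_cases hzk : pvKey z = k
    · rw [List.dropWhile_cons_of_pos (by simp [hzk])]
      exact ih hr (fun y hy => hge y (List.mem_cons_of_mem z hy))
    · rw [List.dropWhile_cons_of_neg (by simp [hzk])]
      intro y hy
      rcases List.mem_cons.mp hy with rfl | hy
      · exact hzk
      · have hky : k < pvKey z := lt_of_le_of_ne (hge z (List.mem_cons_self)) (Ne.symm hzk)
        exact fun he => absurd (he ▸ hz y hy) (not_le.mpr hky)

-- CORE 2: on a key-sorted list of ok items the scan is exactly B's first-of-each-run pass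
theorem pvScan_eq_runs : ∀ (n : Nat) (m : List (List (String × String))) (s : List String),
    m.length ≤ n →
    m.Pairwise (fun a b => pvKey a ≤ pvKey b) →
    (∀ y ∈ m, pvOk y = true) →
    (∀ y ∈ m, pvKey y ∉ s) →
    pvScan s m = pvRuns m := by
  intro n
  induction n with
  | zero =>
    intro m s hlen _ _ _
    rw [List.length_eq_zero_iff.mp (Nat.le_zero.mp hlen)]
    simp [pvScan, pvRuns]
  | succ n ih =>
    intro m s hlen hsort hok hns
    match m with
    | [] => simp [pvScan, pvRuns]
    | x :: t =>
      rcases List.pairwise_cons.mp hsort with ⟨hx, ht⟩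
      simp only [pvScan, pvRuns]
      rw [if_pos ⟨hok x List.mem_cons_self, hns x List.mem_cons_self⟩]
      congr 1
      rw [pvRunsAfter_dropWhile, ← pvScan_skip (pvKey x) (s ++ [pvKey x]) t (by simp)]
      have hne := pvDropWhile_keys (pvKey x) t ht hx
      refine ih _ _ ?_ ?_ ?_ ?_
      · exact le_trans (List.length_dropWhile_le _ _) (Nat.le_of_succ_le_succ hlen)
      · exact ht.sublist (List.dropWhile_sublist _)
      · exact fun y hy => hok y (List.mem_cons_of_mem x ((List.dropWhile_sublist _).mem hy))
      · intro y hy hmem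
        rcases List.mem_append.mp hmem with hmem | hmem
        · exact hns y (List.mem_cons_of_mem x ((List.dropWhile_sublist _).mem hy)) hmem
        · exact hne y hy (List.mem_singleton.mp hmem)

-- ===== VERDICT (by name: the statement is the Claim_ definition above) =====
theorem merge_glossaries_spec : Claim_equal_merge_glossaries := by
  intro ts ct _
  unfold Spec_merge_glossaries merge_glossaries merge_glossaries_alt
  simp only []
  rw [pvFoldl_flatMap, ← List.foldl_append, pvAStep_foldl]
  have hkeys : (PySem.Dict.empty : PySem.Dict String (List (String × String))).keys = [] := rfl
  have hvals : (PySem.Dict.empty : PySem.Dict String (List (String × String))).values = [] := rfl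
  rw [hkeys, hvals]
  simp only [List.nil_append]
  set L := ts.flatMap (fun p => PySem.Dict.getD (PySem.Dict.mk p.2) "glossary" [])
      ++ PySem.Dict.getD (PySem.Dict.mk ct) "glossary" [] with hL
  have h1 : PySem.List.sorted (pvScan [] L) pvKey = pvScan [] (PySem.List.sorted L pvKey) :=
    pvScan_sorted L
  rw [h1]
  have hfe : (fun it => !(pvTerm it == "")) = pvOk := rfl
  rw [hfe, ← pvScan_filter (PySem.List.sorted L pvKey) []]
  refine pvScan_eq_runs ((PySem.List.sorted L pvKey).filter pvOk).length _ [] le_rfl ?_ ?_ ?_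
  · exact (PySem.List.sorted_pairwise L pvKey).filter _
  · exact fun y hy => (List.mem_filter.mp hy).2
  · simp
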